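-- pv_equiv track=rewrite | github.com/StatGameDev/PS_Calc | tools/import_skill_db.py | mask_subblocks
-- ===== SOURCE A (Python) =====
-- def mask_subblocks(text: str, blank_from_depth: int = 1) -> str:
--     """
--     Replace all content inside { } blocks at or beyond blank_from_depth with spaces.
--
--     blank_from_depth=2: use on a full entry block (outer { } = depth 1, visible;
--                         nested blocks at depth 2+ are blanked).
--     blank_from_depth=1: use on inner sub-block text (no surrounding braces;
--                         any nested per-level or flag block at depth 1+ is blanked).
--     """
--     result = list(text)
--     depth = 0
--     for i, ch in enumerate(text):
--         if ch == "{":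
--             depth += 1
--             if depth >= blank_from_depth:
--                 result[i] = " "
--         elif ch == "}":
--             if depth >= blank_from_depth:
--                 result[i] = " "
--             depth -= 1
--         elif depth >= blank_from_depth:
--             result[i] = " "
--     return "".join(result)
-- ===== SOURCE B (Python) =====
-- def mask_subblocks(text: str, blank_from_depth: int = 1) -> str:
--     # Pass 1: prefix-depth table d, where d[i] is the brace depth of text[:i].
--     d = [0] * (len(text) + 1)
--     for i, ch in enumerate(text):
--         d[i + 1] = d[i] + (1 if ch == "{" else -1 if ch == "}" else 0)
--     # Pass 2: blank a char iff its governing depth reaches blank_from_depth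
--     # ('{' counts at the depth it opens, i.e. d[i] + 1).
--     return "".join(
--         " " if d[i] + (1 if ch == "{" else 0) >= blank_from_depth else ch
--         for i, ch in enumerate(text)
--     )
-- ===== Notes on version B (the rewrite author's own statement) =====
-- stated objective: alternative
-- what changed: Replaces A's single scan that mutates result[i] under a running depth counter by a two-pass decomposition: first build a prefix-depth table d (d[i] = brace depth of text[:i]), then emit each character by a pure per-char rule on (d[i], ch).
import Mathlib
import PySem

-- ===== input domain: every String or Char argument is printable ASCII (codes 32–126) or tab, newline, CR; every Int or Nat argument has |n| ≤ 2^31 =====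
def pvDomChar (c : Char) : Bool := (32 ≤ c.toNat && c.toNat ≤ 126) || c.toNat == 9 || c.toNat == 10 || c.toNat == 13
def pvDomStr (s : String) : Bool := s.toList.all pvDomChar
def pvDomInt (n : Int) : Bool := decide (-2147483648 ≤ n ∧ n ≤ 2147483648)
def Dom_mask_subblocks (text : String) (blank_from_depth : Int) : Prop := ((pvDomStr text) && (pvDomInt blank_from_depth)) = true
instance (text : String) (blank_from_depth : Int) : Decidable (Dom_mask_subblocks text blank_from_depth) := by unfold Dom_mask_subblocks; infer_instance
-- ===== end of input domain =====

-- B replaces A's single mutating scan by a two-pass prefix-depth table + per-char rule (same cost, different decomposition).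

-- ===== PORT A =====
-- A's for-loop over enumerate(text), mutating result[i] in place; state = (index, depth, result).
def maskAgo (bfd : Int) : List Char → Nat → Int → List Char → List Char
  | [], _, _, result => result
  | ch :: rest, i, depth, result =>
    if ch = '{' then
      let depth' := depth + 1
      maskAgo bfd rest (i + 1) depth' (if depth' ≥ bfd then result.set i ' ' else result)
    else if ch = '}' then
      maskAgo bfd rest (i + 1) (depth - 1) (if depth ≥ bfd then result.set i ' ' else result)
    else
      maskAgo bfd rest (i + 1) depth (if depth ≥ bfd then result.set i ' ' else result)

def mask_subblocks (text : String) (blank_from_depth : Int) : String :=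
  String.mk (maskAgo blank_from_depth text.toList 0 0 text.toList)

-- ===== PORT B =====
def deltaB (ch : Char) : Int := if ch = '{' then 1 else if ch = '}' then -1 else 0

-- prefix-depth table: d[i] = brace depth of text[:i] (length n+1, built left to right)
def depthsB (a : Int) : List Char → List Int
  | [] => [a]
  | ch :: rest => a :: depthsB (a + deltaB ch) rest

def ruleB (bfd : Int) (p : Int × Char) : Char :=
  if p.1 + (if p.2 = '{' then 1 else 0) ≥ bfd then ' ' else p.2

def mask_subblocks_alt (text : String) (blank_from_depth : Int) : String :=
  String.mk (((depthsB 0 text.toList).zip text.toList).map (ruleB blank_from_depth))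

-- ===== PRECONDITION & SPEC =====
def Spec_mask_subblocks (text : String) (blank_from_depth : Int) (out : String) : Prop := out = mask_subblocks_alt text blank_from_depth
instance (text : String) (blank_from_depth : Int) (out : String) : Decidable (Spec_mask_subblocks text blank_from_depth out) := by unfold Spec_mask_subblocks; infer_instance

-- ===== CLAIM (what is proved, stated in full; the proofs are below) =====
def Claim_equal_mask_subblocks : Prop := ∀ (text : String) (blank_from_depth : Int), Dom_mask_subblocks text blank_from_depth → Spec_mask_subblocks text blank_from_depth (mask_subblocks text blank_from_depth)

-- ===== LEMMAS AND PROOFS =====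

theorem maskAgo_eq (bfd : Int) (cs : List Char) : ∀ (pre : List Char) (depth : Int),
    maskAgo bfd cs pre.length depth (pre ++ cs)
      = pre ++ ((depthsB depth cs).zip cs).map (ruleB bfd) := by
  induction cs with
  | nil => intro pre depth; simp [maskAgo, depthsB]
  | cons c rest ih =>
    intro pre depth
    have hset : ∀ x : Char, (pre ++ c :: rest).set pre.length x = pre ++ x :: rest := by
      intro x
      rw [List.set_append]
      simp
    have step : ∀ (x : Char) (d' : Int),
        maskAgo bfd rest (pre.length + 1) d' (pre ++ x :: rest)
          = pre ++ x :: ((depthsB d' rest).zip rest).map (ruleB bfd) := by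
      intro x d'
      have := ih (pre ++ [x]) d'
      simpa using this
    by_cases hob : c = '{'
    · subst hob
      simp only [maskAgo]
      by_cases h : depth + 1 ≥ bfd
      · rw [if_pos h, hset, step]
        simp [depthsB, deltaB, ruleB, h, sub_eq_add_neg]
      · rw [if_neg h, step]
        simp [depthsB, deltaB, ruleB, h, sub_eq_add_neg]
    · by_cases hcb : c = '}'
      · subst hcb
        simp only [maskAgo, if_neg (show ¬('}' = '{') by decide)]
        by_cases h : depth ≥ bfd
        · rw [if_pos h, hset, step]
          simp [depthsB, deltaB, ruleB, h, sub_eq_add_neg]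
        · rw [if_neg h, step]
          simp [depthsB, deltaB, ruleB, h, sub_eq_add_neg]
      · simp only [maskAgo, if_neg hob, if_neg hcb]
        by_cases h : depth ≥ bfd
        · rw [if_pos h, hset, step]
          simp [depthsB, deltaB, ruleB, hob, hcb, h]
        · rw [if_neg h, step]
          simp [depthsB, deltaB, ruleB, hob, hcb, h]

-- ===== VERDICT (by name: the statement is the Claim_ definition above) =====
theorem mask_subblocks_spec : Claim_equal_mask_subblocks := by
  intro text bfd _
  unfold Spec_mask_subblocks mask_subblocks mask_subblocks_alt
  have h := maskAgo_eq bfd text.toList [] 0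
  simp only [List.length_nil, List.nil_append] at h
  rw [h]
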